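-- pv_equiv track=rewrite | github.com/rinaldia92/TDA2 | codigos/zbox.py | zbox
-- ===== SOURCE A (Python) =====
-- def zbox(P,T):
--
--     string = P+"$"+T
--
--     size = len(string)
--     sizepattern = len(P)
--
--     l = 0
--     r = 0
--     z = []
--     z.append(0)
--
--     index = []
--
--     for k in range (1,size):
--         x = 0
--         if k > r:
--             if string[x] == string[x+k]:
--                 l = k
--                 x += 1
--             while x+k < size and string[x] == string[x+k]:
--                 x += 1
--             r = k + x - 1
--             z.append(x)
--         else:
--             i = k - l
--             if z[i] < r - k + 1:
--                 z.append(z[i])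
--             else:
--                 l = k
--                 i = k + 1
--                 while i < size and string[i] == string[i-k]:
--                     i += 1
--                 r = i - 1
--                 z.append(i-k)
--
--     for k in range(len(z)):
--         aux = z[k]
--         if aux == sizepattern:
--             index.append(aux-sizepattern+1)
--     return index
-- ===== SOURCE B (Python) =====
-- def zbox(P, T):
--     s = P + "$" + T
--     m = len(P)
--     z = [0] * len(s)
--     for k in range(1, len(s)):
--         while k + z[k] < len(s) and s[z[k]] == s[k + z[k]]:
--             z[k] += 1
--     return [v - m + 1 for v in z if v == m]
-- ===== Notes on version B (the rewrite author's own statement) =====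
-- stated objective: simpler
-- what changed: Replaces the stateful l/r-window Z-algorithm (window maintenance, z-array reuse by cases) with a plain naive Z-array computed by direct character comparison at each position, followed by the same reporting pass.
import Mathlib
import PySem

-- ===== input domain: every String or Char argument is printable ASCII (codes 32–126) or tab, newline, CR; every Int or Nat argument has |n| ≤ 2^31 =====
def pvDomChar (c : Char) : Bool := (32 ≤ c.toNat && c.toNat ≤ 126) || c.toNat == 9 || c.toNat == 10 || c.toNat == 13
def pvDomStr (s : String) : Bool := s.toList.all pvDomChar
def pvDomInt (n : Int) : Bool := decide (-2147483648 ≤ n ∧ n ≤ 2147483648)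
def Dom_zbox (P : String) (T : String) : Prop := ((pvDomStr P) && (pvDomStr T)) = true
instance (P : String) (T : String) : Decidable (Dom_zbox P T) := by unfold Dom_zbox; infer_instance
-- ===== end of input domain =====

-- B replaces A's stateful l/r-window Z-algorithm by a plain naive Z-array computation
-- (each entry by direct comparison) followed by the same reporting pass (simpler; not faster).

-- ===== PORT A =====
-- A's inner while "while x+k < size and string[x] == string[x+k]: x += 1"
def aWhile1 (s : List Char) (k x : Nat) : Nat :=
  if k + x < s.length ∧ s.getD x ' ' = s.getD (k + x) ' ' then aWhile1 s k (x + 1) else x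
termination_by s.length - x
decreasing_by omega

-- A's inner while "while i < size and string[i] == string[i-k]: i += 1"
def aWhile2 (s : List Char) (k i : Nat) : Nat :=
  if i < s.length ∧ s.getD i ' ' = s.getD (i - k) ' ' then aWhile2 s k (i + 1) else i
termination_by s.length - i
decreasing_by omega

-- one iteration of A's main "for k in range(1, size)" loop; state is (l, r, z)
def aStep (s : List Char) (st : Nat × Nat × List Nat) (k : Nat) : Nat × Nat × List Nat :=
  let l := st.1; let r := st.2.1; let z := st.2.2
  if r < k then  -- Python: k > r
    let lx := if s.getD 0 ' ' = s.getD k ' ' then (k, 1) else (l, 0)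
    let x := aWhile1 s k lx.2
    (lx.1, k + x - 1, z ++ [x])
  else
    let i := k - l
    if z.getD i 0 < r - k + 1 then (l, r, z ++ [z.getD i 0])
    else
      let i2 := aWhile2 s k (k + 1)
      (k, i2 - 1, z ++ [i2 - k])

def zbox (P : String) (T : String) : List Int :=
  let s := (P ++ "$" ++ T).toList
  let size := s.length
  let sizepattern := P.toList.length
  let st := (List.range' 1 (size - 1)).foldl (aStep s) (0, 0, [0])
  let z := st.2.2
  (List.range z.length).foldl
    (fun index k => if z.getD k 0 = sizepattern
      then index ++ [((z.getD k 0 : Int) - (sizepattern : Int) + 1)] else index) []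

-- ===== PORT B =====
-- B's "while k + z[k] < len(s) and s[z[k]] == s[k + z[k]]: z[k] += 1"
def bzLen (s : List Char) (k j : Nat) : Nat :=
  if k + j < s.length ∧ s.getD j ' ' = s.getD (k + j) ' ' then bzLen s k (j + 1) else j
termination_by s.length - j
decreasing_by omega

def zbox_alt (P : String) (T : String) : List Int :=
  let s := (P ++ "$" ++ T).toList
  let m := P.toList.length
  -- z = [0] * len(s), then z[k] grown by the while loop for k in range(1, len(s))
  let z := 0 :: (List.range' 1 (s.length - 1)).map (fun k => bzLen s k 0)
  (z.filter (fun v => v = m)).map (fun (v : Nat) => (v : Int) - (m : Int) + 1)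

-- ===== PRECONDITION & SPEC =====
def Spec_zbox (P : String) (T : String) (out : List Int) : Prop := out = zbox_alt P T
instance (P : String) (T : String) (out : List Int) : Decidable (Spec_zbox P T out) := by unfold Spec_zbox; infer_instance

-- ===== CLAIM (what is proved, stated in full; the proofs are below) =====
def Claim_equal_zbox : Prop := ∀ (P : String) (T : String), Dom_zbox P T → Spec_zbox P T (zbox P T)

-- ===== LEMMAS AND PROOFS =====

theorem aWhile1_eq_bzLen (s : List Char) (k x : Nat) : aWhile1 s k x = bzLen s k x := by
  fun_induction aWhile1 s k x with
  | case1 x h ih => rw [bzLen, if_pos h]; exact ih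
  | case2 x h => rw [bzLen, if_neg h]

theorem aWhile2_eq_bzLen (s : List Char) (k i : Nat) (h : k ≤ i) :
    aWhile2 s k i = k + bzLen s k (i - k) := by
  fun_induction aWhile2 s k i with
  | case1 i hc ih =>
    have hki : k + (i - k) = i := by omega
    have hb : bzLen s k (i - k) = bzLen s k (i - k + 1) := by
      rw [bzLen, if_pos ⟨by omega, by rw [hki]; exact hc.2.symm⟩]
    rw [hb]
    simpa [show i + 1 - k = i - k + 1 from by omega] using ih (by omega)
  | case2 i hc =>
    rw [bzLen, if_neg]
    · omega
    · intro hcon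
      apply hc
      have hki : k + (i - k) = i := by omega
      rw [hki] at hcon
      exact ⟨hcon.1, hcon.2.symm⟩

theorem bzLen_ge (s : List Char) (k j : Nat) : j ≤ bzLen s k j := by
  fun_induction bzLen s k j with
  | case1 j h ih => omega
  | case2 j h => omega

theorem bzLen_le (s : List Char) (k j : Nat) (h : k + j ≤ s.length) :
    k + bzLen s k j ≤ s.length := by
  fun_induction bzLen s k j with
  | case1 j hc ih => exact ih (by omega)
  | case2 j hc => exact h

theorem bzLen_match (s : List Char) (k j : Nat) :
    ∀ t, j ≤ t → t < bzLen s k j → k + t < s.length ∧ s.getD t ' ' = s.getD (k + t) ' ' := by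
  fun_induction bzLen s k j with
  | case1 j hc ih =>
    intro t h1 h2
    rcases Nat.eq_or_lt_of_le h1 with rfl | h1'
    · exact hc
    · exact ih t h1' h2
  | case2 j hc =>
    intro t h1 h2; omega

theorem bzLen_stop (s : List Char) (k j : Nat) :
    ¬(k + bzLen s k j < s.length ∧ s.getD (bzLen s k j) ' ' = s.getD (k + bzLen s k j) ' ') := by
  fun_induction bzLen s k j with
  | case1 j hc ih => exact ih
  | case2 j hc => exact hc

theorem bzLen_unique (s : List Char) (k j : Nat) :
    ∀ y, j ≤ y →
    (∀ t, j ≤ t → t < y → k + t < s.length ∧ s.getD t ' ' = s.getD (k + t) ' ') →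
    ¬(k + y < s.length ∧ s.getD y ' ' = s.getD (k + y) ' ') →
    bzLen s k j = y := by
  fun_induction bzLen s k j with
  | case1 j hc ih =>
    intro y h0 hm hs
    rcases Nat.eq_or_lt_of_le h0 with rfl | h0'
    · exact absurd hc hs
    · exact ih y (by omega) (fun t ht => hm t (by omega)) hs
  | case2 j hc =>
    intro y h0 hm hs
    rcases Nat.eq_or_lt_of_le h0 with rfl | h0'
    · rfl
    · exact absurd (hm j le_rfl h0') hc

-- copy lemma: inside the window, when z[k-l] is strictly shorter than the window tail,
-- the Z-value repeats.
theorem z_copy (s : List Char) (l r k : Nat) (hl : 1 ≤ l) (hlk : l < k) (hkr : k ≤ r)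
    (hrn : r < s.length)
    (hw : ∀ t, t ≤ r - l → s.getD t ' ' = s.getD (l + t) ' ')
    (hz : bzLen s (k - l) 0 < r - k + 1) :
    bzLen s k 0 = bzLen s (k - l) 0 := by
  apply bzLen_unique s k 0 (bzLen s (k - l) 0) (Nat.zero_le _)
  · intro t _ ht
    have hm := bzLen_match s (k - l) 0 t (Nat.zero_le _) ht
    have hit : k - l + t ≤ r - l := by omega
    refine ⟨by omega, ?_⟩
    calc s.getD t ' ' = s.getD (k - l + t) ' ' := hm.2
      _ = s.getD (l + (k - l + t)) ' ' := hw (k - l + t) hit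
      _ = s.getD (k + t) ' ' := by congr 1; omega
  · rintro ⟨hky, hsy⟩
    have hyk : bzLen s (k - l) 0 ≤ r - k := by omega
    have hiy : k - l + bzLen s (k - l) 0 ≤ r - l := by omega
    apply bzLen_stop s (k - l) 0
    refine ⟨by omega, ?_⟩
    calc s.getD (bzLen s (k - l) 0) ' '
        = s.getD (k + bzLen s (k - l) 0) ' ' := hsy
      _ = s.getD (l + (k - l + bzLen s (k - l) 0)) ' ' := by congr 1; omega
      _ = s.getD (k - l + bzLen s (k - l) 0) ' ' := (hw _ hiy).symm

-- extension lemma: when z[k-l] reaches the window end, the first characters match,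
-- so the full Z-value is the scan restarted at offset 1.
theorem z_ext (s : List Char) (l r k : Nat) (_hl : 1 ≤ l) (hlk : l < k) (hkr : k ≤ r)
    (hrn : r < s.length)
    (hw : ∀ t, t ≤ r - l → s.getD t ' ' = s.getD (l + t) ' ')
    (hz : r - k + 1 ≤ bzLen s (k - l) 0) :
    s.getD 0 ' ' = s.getD k ' ' ∧ bzLen s k 0 = bzLen s k 1 := by
  have h1 : (0 : Nat) < bzLen s (k - l) 0 := by omega
  have hm := bzLen_match s (k - l) 0 0 (Nat.zero_le _) h1
  have hik : k - l ≤ r - l := by omega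
  have hc : s.getD 0 ' ' = s.getD k ' ' := by
    calc s.getD 0 ' ' = s.getD (k - l + 0) ' ' := hm.2
      _ = s.getD (k - l) ' ' := by rw [Nat.add_zero]
      _ = s.getD (l + (k - l)) ' ' := hw (k - l) hik
      _ = s.getD k ' ' := by congr 1; omega
  refine ⟨hc, ?_⟩
  rw [bzLen, if_pos ⟨by omega, by simpa using hc⟩]

-- the loop invariant for A's main fold
def AInv (s : List Char) (k : Nat) (st : Nat × Nat × List Nat) : Prop :=
  st.2.2.length = k ∧ st.2.2.getD 0 0 = 0 ∧
  (∀ i, 1 ≤ i → i < k → st.2.2.getD i 0 = bzLen s i 0) ∧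
  st.2.1 < s.length ∧
  (k ≤ st.2.1 → 1 ≤ st.1 ∧ st.1 < k ∧
    ∀ t, t ≤ st.2.1 - st.1 → s.getD t ' ' = s.getD (st.1 + t) ' ')

theorem getD_append_lt (z : List Nat) (a : Nat) (i : Nat) (h : i < z.length) :
    (z ++ [a]).getD i 0 = z.getD i 0 := by
  simp [List.getD, List.getElem?_append_left h]

theorem getD_append_self (z : List Nat) (a : Nat) :
    (z ++ [a]).getD z.length 0 = a := by
  simp [List.getD]

theorem step_inv (s : List Char) (k : Nat) (st : Nat × Nat × List Nat)
    (hk1 : 1 ≤ k) (hkn : k < s.length) (h : AInv s k st) :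
    AInv s (k + 1) (aStep s st k) := by
  obtain ⟨l, r, z⟩ := st
  obtain ⟨hlen, hz0, hzi, hrn, hwin⟩ := h
  simp only [AInv] at *
  unfold aStep
  simp only
  by_cases hrk : r < k
  · rw [if_pos hrk]
    by_cases hc0 : s.getD 0 ' ' = s.getD k ' '
    · rw [if_pos hc0]
      simp only
      have hx01 : bzLen s k 0 = bzLen s k 1 := by
        rw [bzLen, if_pos ⟨by omega, by simpa using hc0⟩]
      have hxeq : aWhile1 s k 1 = bzLen s k 0 := by
        rw [aWhile1_eq_bzLen, hx01]
      have hxge : 1 ≤ bzLen s k 1 := bzLen_ge s k 1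
      have hxle : k + bzLen s k 1 ≤ s.length := bzLen_le s k 1 (by omega)
      refine ⟨by simp [hlen], ?_, ?_, ?_, ?_⟩
      · rw [getD_append_lt z _ 0 (by omega), hz0]
      · intro i hi1 hi2
        rcases Nat.lt_or_ge i k with hik | hik
        · rw [getD_append_lt z _ i (by omega)]; exact hzi i hi1 hik
        · have : i = z.length := by omega
          rw [this, getD_append_self, hxeq]
          congr 1; omega
      · rw [aWhile1_eq_bzLen]; omega
      · intro hkr'
        rw [aWhile1_eq_bzLen] at hkr' ⊢
        refine ⟨by omega, by omega, ?_⟩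
        intro t ht
        have htx : t < bzLen s k 1 := by omega
        rcases Nat.eq_zero_or_pos t with rfl | htp
        · simpa using hc0
        · have := bzLen_match s k 1 t htp (by omega)
          exact this.2
    · rw [if_neg hc0]
      simp only
      have hx0 : aWhile1 s k 0 = 0 := by
        rw [aWhile1_eq_bzLen, bzLen, if_neg]
        intro hcon; exact hc0 (by simpa using hcon.2)
      have hzk : bzLen s k 0 = 0 := by rw [← aWhile1_eq_bzLen, hx0]
      rw [hx0]
      refine ⟨by simp [hlen], ?_, ?_, by omega, by omega⟩
      · rw [getD_append_lt z _ 0 (by omega), hz0]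
      · intro i hi1 hi2
        rcases Nat.lt_or_ge i k with hik | hik
        · rw [getD_append_lt z _ i (by omega)]; exact hzi i hi1 hik
        · have hval : bzLen s i 0 = 0 := by
            rw [show i = k from by omega]; exact hzk
          rw [hval, show i = z.length from by omega, getD_append_self]
  · rw [if_neg hrk]
    have hkr : k ≤ r := by omega
    obtain ⟨hl1, hlk, hw⟩ := hwin hkr
    have hzival : z.getD (k - l) 0 = bzLen s (k - l) 0 := hzi (k - l) (by omega) (by omega)
    by_cases hcase : z.getD (k - l) 0 < r - k + 1
    · rw [if_pos hcase]
      simp only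
      rw [hzival] at hcase
      have hcopy := z_copy s l r k hl1 hlk hkr hrn hw hcase
      refine ⟨by simp [hlen], ?_, ?_, hrn, ?_⟩
      · rw [getD_append_lt z _ 0 (by omega), hz0]
      · intro i hi1 hi2
        rcases Nat.lt_or_ge i k with hik | hik
        · rw [getD_append_lt z _ i (by omega)]; exact hzi i hi1 hik
        · have : i = z.length := by omega
          rw [this, getD_append_self, hzival, ← hcopy]
          congr 1; omega
      · intro hkr'
        exact ⟨hl1, by omega, hw⟩
    · rw [if_neg hcase]
      simp only
      rw [hzival] at hcase
      have hext := z_ext s l r k hl1 hlk hkr hrn hw (by omega)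
      have hw2 : aWhile2 s k (k + 1) = k + bzLen s k 1 := by
        rw [aWhile2_eq_bzLen s k (k + 1) (by omega), show k + 1 - k = 1 from by omega]
      have hge : 1 ≤ bzLen s k 1 := bzLen_ge s k 1
      have hle : k + bzLen s k 1 ≤ s.length := bzLen_le s k 1 (by omega)
      rw [hw2]
      refine ⟨by simp [hlen], ?_, ?_, by omega, ?_⟩
      · rw [getD_append_lt z _ 0 (by omega), hz0]
      · intro i hi1 hi2
        rcases Nat.lt_or_ge i k with hik | hik
        · rw [getD_append_lt z _ i (by omega)]; exact hzi i hi1 hik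
        · have hval : bzLen s i 0 = bzLen s k 1 := by
            rw [show i = k from by omega]; exact hext.2
          rw [hval, show i = z.length from by omega, getD_append_self]
          omega
      · intro hkr'
        refine ⟨by omega, by omega, ?_⟩
        intro t ht
        rcases Nat.eq_zero_or_pos t with rfl | htp
        · simpa using hext.1
        · exact (bzLen_match s k 1 t htp (by omega)).2

theorem fold_inv (s : List Char) (c : Nat) :
    ∀ (k : Nat) (st : Nat × Nat × List Nat), 1 ≤ k → k + c ≤ s.length → AInv s k st →
    AInv s (k + c) ((List.range' k c).foldl (aStep s) st) := by
  induction c with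
  | zero => intro k st _ _ h; simpa using h
  | succ c ih =>
    intro k st hk1 hbound h
    rw [List.range'_succ, List.foldl_cons]
    have := ih (k + 1) (aStep s st k) (by omega) (by omega)
      (step_inv s k st hk1 (by omega) h)
    simpa [Nat.add_assoc, Nat.add_comm 1 c] using this

theorem toList_cat (P T : String) :
    (P ++ "$" ++ T).toList = P.toList ++ '$' :: T.toList := by
  simp

theorem zbox_eq (P T : String) : zbox P T = zbox_alt P T := by
  unfold zbox zbox_alt
  simp only
  set s := (P ++ "$" ++ T).toList with hs
  set n := s.length with hn
  set m := P.toList.length with hm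
  have hn1 : 1 ≤ n := by
    rw [hn, hs, toList_cat]
    simp only [List.length_append, List.length_cons]
    omega
  -- establish the invariant at the end of A's main loop
  have hinv0 : AInv s 1 (0, 0, [0]) := by
    refine ⟨rfl, rfl, fun i h1 h2 => absurd h2 (by omega), ?_, ?_⟩
    · show (0 : Nat) < s.length
      omega
    · show (1 : Nat) ≤ 0 → _
      omega
  have hinv := fold_inv s (n - 1) 1 (0, 0, [0]) le_rfl (by omega) hinv0
  set st := (List.range' 1 (n - 1)).foldl (aStep s) (0, 0, [0]) with hst
  obtain ⟨hlen, hz0, hzi, -, -⟩ := hinv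
  have hlen' : st.2.2.length = n := by omega
  rw [hlen']
  -- turn A's output fold into a filter+map
  rw [PySem.List.foldl_append_ite (p := fun k => st.2.2.getD k 0 = m)
    (f := fun k => ((st.2.2.getD k 0 : Int) - (m : Int) + 1))]
  rw [List.nil_append]
  have hrange : List.range n = 0 :: List.range' 1 (n - 1) := by
    have h2 : n - 1 + 1 = n := by omega
    calc List.range n = List.range' 0 n := List.range_eq_range'
      _ = List.range' 0 (n - 1 + 1) := by rw [h2]
      _ = 0 :: List.range' 1 (n - 1) := List.range'_succ
  rw [hrange]
  simp only [List.filter_cons]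
  -- B's tail: filter over a map is a map over a filter
  rw [List.filter_map]
  -- the two tails coincide elementwise on the range
  have htail : (List.range' 1 (n - 1)).filter (fun k => decide (st.2.2.getD k 0 = m)) =
      (List.range' 1 (n - 1)).filter ((fun v => decide (v = m)) ∘ (fun k => bzLen s k 0)) := by
    apply List.filter_congr
    intro k hk
    rw [List.mem_range'] at hk
    simp only [Function.comp]
    rw [hzi k (by omega) (by omega)]
  have hmap : ∀ (L : List Nat), (∀ k ∈ L, 1 ≤ k ∧ k < n) →
      L.map (fun k => ((st.2.2.getD k 0 : Int) - (m : Int) + 1)) =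
      L.map ((fun v => ((v : Int) - (m : Int) + 1)) ∘ (fun k => bzLen s k 0)) := by
    intro L hL
    apply List.map_congr_left
    intro k hk
    obtain ⟨h1, h2⟩ := hL k hk
    simp only [Function.comp]
    rw [hzi k h1 (by omega)]
  have htailmem : ∀ k ∈ (List.range' 1 (n - 1)).filter
      ((fun v => decide (v = m)) ∘ (fun k => bzLen s k 0)), 1 ≤ k ∧ k < n := by
    intro k hk
    rw [List.mem_filter] at hk
    have := List.mem_range'.mp hk.1
    omega
  by_cases hm0 : m = 0
  · have hdA : decide (st.2.2.getD 0 0 = m) = true := decide_eq_true (by rw [hz0, hm0])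
    have hdB : decide ((0 : Nat) = m) = true := decide_eq_true hm0.symm
    rw [if_pos hdA, if_pos hdB, List.map_cons, List.map_cons, List.map_map, htail]
    congr 1
    · rw [hz0]
    · exact hmap _ htailmem
  · have hdA : ¬(decide (st.2.2.getD 0 0 = m) = true) := by
      rw [hz0]; simpa using fun h => hm0 h.symm
    have hdB : ¬(decide ((0 : Nat) = m) = true) := by
      simpa using fun h => hm0 h.symm
    rw [if_neg hdA, if_neg hdB, List.map_map, htail]
    exact hmap _ htailmem

-- ===== VERDICT (by name: the statement is the Claim_ definition above) =====
theorem zbox_spec : Claim_equal_zbox := by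
  intro P T _
  unfold Spec_zbox
  exact zbox_eq P T
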